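-- pv_equiv track=rewrite | github.com/qianzii2/Z1DB | metal/bitmagic.py | pdep
-- ===== SOURCE A (Python) =====
-- def pdep(source: int, mask: int) -> int:
--     """并行位存放。将 source 低位分散到 mask 的置位位置。"""
--     result = 0
--     k = 0
--     m = mask
--     while m:
--         lowest = m & (-m)
--         if source & (1 << k):
--             result |= lowest
--         m &= m - 1
--         k += 1
--     return result
-- ===== SOURCE B (Python) =====
-- def pdep(source: int, mask: int) -> int:
--     """并行位存放。将 source 低位分散到 mask 的置位位置。"""
--     if mask == 0:
--         return 0
--     if mask & 1:
--         return (source & 1) | (pdep(source >> 1, mask >> 1) << 1)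
--     return pdep(source, mask >> 1) << 1
-- ===== Notes on version B (the rewrite author's own statement) =====
-- stated objective: simpler
-- what changed: Replaces the iterative pop-lowest-set-bit loop (m & -m, m &= m-1, source indexed by a counter k, OR-accumulator) by a short recursion on the binary expansion of mask: it inspects only mask & 1, shifts mask (and source, when the bit is set) right and rebuilds the result by shifting the recursive value left; no counter, no accumulator, no set-bit isolation.
import Mathlib
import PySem

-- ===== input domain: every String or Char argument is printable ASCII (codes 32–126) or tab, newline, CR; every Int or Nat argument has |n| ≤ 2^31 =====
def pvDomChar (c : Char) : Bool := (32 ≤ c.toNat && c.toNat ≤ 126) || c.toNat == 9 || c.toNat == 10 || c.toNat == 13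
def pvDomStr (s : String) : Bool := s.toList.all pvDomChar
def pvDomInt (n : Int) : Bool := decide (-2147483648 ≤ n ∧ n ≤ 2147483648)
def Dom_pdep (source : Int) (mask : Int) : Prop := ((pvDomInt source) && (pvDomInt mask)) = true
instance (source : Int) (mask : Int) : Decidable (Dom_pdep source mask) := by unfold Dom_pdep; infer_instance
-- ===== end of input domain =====

-- B replaces A's pop-lowest-set-bit while-loop (m & -m, m &= m-1, counter k, OR-accumulator)
-- by a short recursion on the binary expansion of mask (objective: simpler, same cost).

-- ===== PORT A =====
-- the fuel only makes the while-loop structurally total: mask.toNat + 1 strictly exceeds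
-- the number of iterations (= popcount mask ≤ mask) whenever mask ≥ 0 (i.e. on all of Pre_)
def pdepLoop (source : Int) : Nat → Int → Int → Int → Int
  | 0, _, _, result => result
  | fuel+1, m, k, result =>
    if m = 0 then result
    else
      let lowest := PySem.Int.band m (-m)
      let result' := if PySem.Int.band source ((1:Int) <<< k) ≠ 0
                     then PySem.Int.bor result lowest else result
      pdepLoop source fuel (PySem.Int.band m (m - 1)) (k + 1) result'

def pdep (source : Int) (mask : Int) : Int :=
  pdepLoop source (mask.toNat + 1) mask 0 0

-- ===== PORT B =====
-- the fuel only makes Source B's recursion structurally total: mask.toNat + 1 strictly exceeds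
-- the recursion depth (= bit length of mask) whenever mask ≥ 0 (i.e. on all of Pre_)
def pdepAltRec (source : Int) : Nat → Int → Int
  | 0, _ => 0
  | fuel+1, mask =>
    if mask = 0 then 0
    else if PySem.Int.band mask 1 ≠ 0 then
      PySem.Int.bor (PySem.Int.band source 1) ((pdepAltRec (source >>> (1:Int)) fuel (mask >>> (1:Int))) <<< (1:Int))
    else (pdepAltRec source fuel (mask >>> (1:Int))) <<< (1:Int)

def pdep_alt (source : Int) (mask : Int) : Int :=
  pdepAltRec source (mask.toNat + 1) mask

-- ===== PRECONDITION & SPEC =====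
-- Pre_ excludes negative mask: there A's while-loop never terminates (m &= m-1 keeps m
-- negative and nonzero), so A returns exactly on the inputs with mask ≥ 0.
def Pre_pdep (source : Int) (mask : Int) : Prop := 0 ≤ mask
instance (source : Int) (mask : Int) : Decidable (Pre_pdep source mask) := by
  unfold Pre_pdep; infer_instance

def pvWitness_pdep : Int × Int := (5, 6)

def Spec_pdep (source : Int) (mask : Int) (out : Int) : Prop := out = pdep_alt source mask
instance (source : Int) (mask : Int) (out : Int) : Decidable (Spec_pdep source mask out) := by
  unfold Spec_pdep; infer_instance

-- ===== CLAIM (what is proved, stated in full; the proofs are below) =====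
def Claim_equal_pdep : Prop := ∀ (source : Int) (mask : Int),
  Dom_pdep source mask → Pre_pdep source mask → Spec_pdep source mask (pdep source mask)

-- ===== LEMMAS AND PROOFS =====

-- the set-bit positions of M, in increasing order
def pvPos (M : Nat) : List Nat := (List.range M.size).filter (fun i => M.testBit i)

-- the bit-k test A applies to source
def pvCb (s : Int) (k : Nat) : Bool := PySem.Int.band s ((1:Int) <<< ((k : Nat) : Int)) != 0

-- bit k of s in infinite two's complement
def pvTB (s : Int) (k : Nat) : Bool :=
  match s with
  | .ofNat n => n.testBit k
  | .negSucc n => !(n.testBit k)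

-- reference scatter: bit k of source goes to position ps[k]
def pvScat (s : Int) : Nat → List Nat → Nat
  | _, [] => 0
  | k, p :: ps => (if pvCb s k then 2 ^ p else 0) ||| pvScat s (k + 1) ps

-- Nat-level image of A's loop
def pvNatLoop (s : Int) : Nat → Nat → Nat → Nat → Nat
  | 0, _, _, r => r
  | fuel+1, M, k, r =>
    if M = 0 then r
    else pvNatLoop s fuel (M &&& (M - 1)) (k + 1)
           (if pvCb s k then r ||| (M - (M &&& (M - 1))) else r)

-- Nat-level image of B's recursion
def pvB (s : Int) (M : Nat) : Nat :=
  if M = 0 then 0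
  else if M % 2 = 1 then (if pvCb s 0 then 1 else 0) ||| 2 * pvB (s >>> (1:Int)) (M / 2)
  else 2 * pvB s (M / 2)
decreasing_by all_goals omega

-- number of trailing zero bits
def pvTz (M : Nat) : Nat :=
  if M % 2 = 1 ∨ M ≤ 1 then 0 else pvTz (M / 2) + 1

theorem pv_land_odd (a : Nat) : (2 * a + 1) &&& (2 * a) = 2 * a := by
  apply Nat.eq_of_testBit_eq
  intro i
  cases i with
  | zero => simp [Nat.testBit_zero, Nat.mul_mod_right]
  | succ i =>
      rw [Nat.testBit_land, Nat.testBit_add_one, Nat.testBit_add_one]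
      have h1 : (2 * a + 1) / 2 = a := by omega
      have h2 : (2 * a) / 2 = a := by omega
      rw [h1, h2, Bool.and_self]

theorem pv_land_even (a : Nat) (h : 0 < a) :
    (2 * a) &&& (2 * a - 1) = 2 * (a &&& (a - 1)) := by
  apply Nat.eq_of_testBit_eq
  intro i
  cases i with
  | zero => simp [Nat.testBit_zero, Nat.mul_mod_right]
  | succ i =>
      rw [Nat.testBit_land, Nat.testBit_add_one, Nat.testBit_add_one, Nat.testBit_add_one]
      have h1 : (2 * a) / 2 = a := by omega
      have h2 : (2 * a - 1) / 2 = a - 1 := by omega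
      have h3 : (2 * (a &&& (a - 1))) / 2 = a &&& (a - 1) := by omega
      rw [h1, h2, h3, Nat.testBit_land]

theorem pv_size_odd (a : Nat) : (2 * a + 1).size = a.size + 1 := by
  have := @Nat.size_bit true a (by simp [Nat.bit])
  simpa [Nat.bit] using this

theorem pv_size_even (a : Nat) (h : 0 < a) : (2 * a).size = a.size + 1 := by
  have := @Nat.size_bit false a (by simp [Nat.bit]; omega)
  simpa [Nat.bit] using this

theorem pv_pos_even (a : Nat) : pvPos (2 * a) = (pvPos a).map (· + 1) := by
  rcases Nat.eq_zero_or_pos a with rfl | h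
  · simp [pvPos]
  · unfold pvPos
    rw [pv_size_even a h, List.range_succ_eq_map, List.filter_cons]
    have h0 : (2 * a).testBit 0 = false := by
      simp [Nat.testBit_zero, Nat.mul_mod_right]
    rw [h0]
    show List.filter _ (List.map Nat.succ (List.range a.size)) = _
    rw [List.filter_map]
    congr 1
    apply List.filter_congr
    intro x _
    show (2 * a).testBit (Nat.succ x) = a.testBit x
    rw [Nat.testBit_add_one]
    congr 1
    omega

theorem pv_pos_odd (a : Nat) : pvPos (2 * a + 1) = 0 :: (pvPos a).map (· + 1) := by
  unfold pvPos
  rw [pv_size_odd a, List.range_succ_eq_map, List.filter_cons]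
  have h0 : (2 * a + 1).testBit 0 = true := by
    simp [Nat.testBit_zero]
  rw [h0]
  show 0 :: List.filter _ (List.map Nat.succ (List.range a.size)) = _
  rw [List.filter_map]
  congr 2
  apply List.filter_congr
  intro x _
  show (2 * a + 1).testBit (Nat.succ x) = a.testBit x
  rw [Nat.testBit_add_one]
  congr 1
  omega

theorem pv_lowest (M : Nat) (h : 0 < M) : M - (M &&& (M - 1)) = 2 ^ pvTz M := by
  induction M using Nat.strong_induction_on with
  | _ M ih =>
    rcases Nat.even_or_odd M with ⟨a, ha⟩ | ⟨a, ha⟩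
    · have ha' : M = 2 * a := by omega
      have hapos : 0 < a := by omega
      subst ha'
      rw [pv_land_even a hapos]
      have htz : pvTz (2 * a) = pvTz a + 1 := by
        rw [pvTz, if_neg (by omega)]
        congr 1; congr 1; omega
      rw [htz]
      have hle : a &&& (a - 1) ≤ a - 1 := Nat.and_le_right
      have := ih a (by omega) hapos
      rw [pow_succ]
      omega
    · have ha' : M = 2 * a + 1 := by omega
      subst ha'
      have h1 : (2 * a + 1) - 1 = 2 * a := by omega
      rw [h1, pv_land_odd a]
      have htz : pvTz (2 * a + 1) = 0 := by rw [pvTz, if_pos (by omega)]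
      rw [htz]
      omega

theorem pv_pos_strip (M : Nat) (h : 0 < M) :
    pvPos M = pvTz M :: pvPos (M &&& (M - 1)) := by
  induction M using Nat.strong_induction_on with
  | _ M ih =>
    rcases Nat.even_or_odd M with ⟨a, ha⟩ | ⟨a, ha⟩
    · have ha' : M = 2 * a := by omega
      have hapos : 0 < a := by omega
      subst ha'
      rw [pv_land_even a hapos, pv_pos_even a, ih a (by omega) hapos, pv_pos_even]
      have htz : pvTz (2 * a) = pvTz a + 1 := by
        rw [pvTz, if_neg (by omega)]
        congr 1; congr 1; omega
      rw [htz, List.map_cons]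
    · have ha' : M = 2 * a + 1 := by omega
      subst ha'
      have h1 : (2 * a + 1) - 1 = 2 * a := by omega
      rw [h1, pv_land_odd a, pv_pos_odd a, pv_pos_even a]
      have htz : pvTz (2 * a + 1) = 0 := by rw [pvTz, if_pos (by omega)]
      rw [htz]

theorem pv_natLoop_eq (s : Int) (M : Nat) : ∀ fuel, M ≤ fuel → ∀ k r,
    pvNatLoop s fuel M k r = r ||| pvScat s k (pvPos M) := by
  induction M using Nat.strong_induction_on with
  | _ M ih =>
    intro fuel hfuel k r
    rcases Nat.eq_zero_or_pos M with rfl | hM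
    · have hpos : pvPos 0 = [] := by simp [pvPos]
      cases fuel with
      | zero => simp [pvNatLoop, hpos, pvScat]
      | succ f => simp [pvNatLoop, hpos, pvScat]
    · obtain ⟨f, rfl⟩ : ∃ f, fuel = f + 1 := ⟨fuel - 1, by omega⟩
      rw [pvNatLoop, if_neg (by omega)]
      have hS : M &&& (M - 1) ≤ M - 1 := Nat.and_le_right
      rw [ih (M &&& (M - 1)) (by omega) f (by omega)]
      rw [pv_pos_strip M hM, pvScat, ← pv_lowest M hM]
      cases hcb : pvCb s k
      · simp
      · simp [Nat.lor_assoc]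

theorem pv_band_neg_self (M : Nat) (h : 0 < M) :
    PySem.Int.band (M : Int) (-(M : Int)) = ((M - (M &&& (M - 1)) : Nat) : Int) := by
  rw [PySem.Int.band]
  rw [if_pos (by positivity), if_neg (by omega)]
  congr 1
  have h1 : ((M : Int)).toNat = M := Int.toNat_natCast M
  have h2 : (-(-(M:Int)) - 1).toNat = M - 1 := by omega
  rw [h1, h2]

theorem pv_band_pred (M : Nat) (h : 0 < M) :
    PySem.Int.band (M : Int) ((M : Int) - 1) = ((M &&& (M - 1) : Nat) : Int) := by
  have h1 : ((M : Int) - 1) = ((M - 1 : Nat) : Int) := by omega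
  rw [h1, PySem.Int.band_natCast]

theorem pv_loopA (s : Int) : ∀ (fuel : Nat) (M k r : Nat),
    pdepLoop s fuel (M : Int) (k : Int) (r : Int) = ((pvNatLoop s fuel M k r : Nat) : Int) := by
  intro fuel
  induction fuel with
  | zero => intro M k r; rfl
  | succ f ihf =>
    intro M k r
    rw [pdepLoop, pvNatLoop]
    rcases Nat.eq_zero_or_pos M with rfl | hM
    · simp
    · rw [if_neg (by omega), if_neg (by omega)]
      simp only [pv_band_neg_self M hM, pv_band_pred M hM]
      have hk : ((k : Int) + 1) = ((k + 1 : Nat) : Int) := by omega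
      have hbit : (PySem.Int.band s ((1:Int) <<< (k:Int)) ≠ 0) = (pvCb s k = true) := by
        simp [pvCb]
      simp only [hbit, hk]
      cases hcb : pvCb s k
      · simp only [Bool.false_eq_true, ite_false]
        exact ihf (M &&& (M - 1)) (k+1) r
      · simp only [ite_true, PySem.Int.bor_natCast]
        exact ihf (M &&& (M - 1)) (k+1) (r ||| (M - (M &&& (M - 1))))

theorem pv_A (s m : Int) (h : 0 ≤ m) :
    pdep s m = ((pvScat s 0 (pvPos m.toNat) : Nat) : Int) := by
  have hm : m = ((m.toNat : Nat) : Int) := by omega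
  rw [pdep, hm]
  simp only [Int.toNat_natCast]
  have hloop := pv_loopA s (m.toNat + 1) m.toNat 0 0
  rw [pv_natLoop_eq s m.toNat (m.toNat + 1) (by omega) 0 0] at hloop
  simpa using hloop

-- B-side lemmas ------------------------------------------------------------

theorem pv_cb_eq_tb (s : Int) (k : Nat) : pvCb s k = pvTB s k := by
  rw [pvCb, Int.one_shiftLeft]
  cases s with
  | ofNat n =>
      show (PySem.Int.band (n : Int) ((2 ^ k : Nat) : Int) != 0) = n.testBit k
      rw [PySem.Int.band_natCast, Nat.and_two_pow]
      cases hb : n.testBit k <;> simp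
  | negSucc n =>
      show (PySem.Int.band (Int.negSucc n) ((2 ^ k : Nat) : Int) != 0) = !(n.testBit k)
      rw [PySem.Int.band]
      rw [if_neg (by omega), if_pos (by positivity)]
      have h1 : ((2 ^ k : Nat) : Int).toNat = 2 ^ k := Int.toNat_natCast _
      have h2 : (-(Int.negSucc n) - 1).toNat = n := by
        rw [Int.negSucc_eq]; omega
      rw [h1, h2, Nat.and_comm (2 ^ k) n, Nat.and_two_pow]
      cases hb : n.testBit k
      · simp only [Bool.toNat_false, Nat.zero_mul, Nat.sub_zero, Bool.not_false]
        simp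
      · simp

theorem pv_tb_shift (s : Int) (k : Nat) : pvTB s (k + 1) = pvTB (s >>> (1:Int)) k := by
  cases s with
  | ofNat n =>
      rw [show (Int.ofNat n) >>> (1:Int) = Int.ofNat (n >>> 1) from rfl]
      show n.testBit (k+1) = (n >>> 1).testBit k
      rw [Nat.testBit_shiftRight]
      congr 1; omega
  | negSucc n =>
      rw [show (Int.negSucc n) >>> (1:Int) = Int.negSucc (n >>> 1) from rfl]
      show (!(n.testBit (k+1))) = (!((n >>> 1).testBit k))
      rw [Nat.testBit_shiftRight]
      congr 2; omega

theorem pv_cb_shift (s : Int) (k : Nat) : pvCb s (k + 1) = pvCb (s >>> (1:Int)) k := by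
  rw [pv_cb_eq_tb, pv_cb_eq_tb, pv_tb_shift]

theorem pv_two_mul_lor (a b : Nat) : 2 * (a ||| b) = 2 * a ||| 2 * b := by
  have h : ∀ x : Nat, 2 * x = x <<< 1 := fun x => by rw [Nat.shiftLeft_eq]; ring
  rw [h, h, h, Nat.shiftLeft_or_distrib]

-- appending 1 to every position doubles the scatter
theorem pv_scat_map (s : Int) (l : List Nat) : ∀ k,
    pvScat s k (l.map (· + 1)) = 2 * pvScat s k l := by
  induction l with
  | nil => intro k; simp [pvScat]
  | cons p ps ih =>
      intro k
      rw [List.map_cons, pvScat, pvScat, ih (k+1), pv_two_mul_lor]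
      congr 1
      cases hcb : pvCb s k
      · simp
      · simp only [ite_true]
        rw [pow_succ]
        ring

-- starting the source index one later is the same as pre-shifting the source
theorem pv_scat_shift (s : Int) (l : List Nat) : ∀ k,
    pvScat s (k + 1) l = pvScat (s >>> (1:Int)) k l := by
  induction l with
  | nil => intro k; simp [pvScat]
  | cons p ps ih =>
      intro k
      rw [pvScat, pvScat, pv_cb_shift s k, ih (k+1)]

theorem pv_pvB_eq_scat (s : Int) (M : Nat) : pvB s M = pvScat s 0 (pvPos M) := by
  induction M using Nat.strong_induction_on generalizing s with
  | _ M ih =>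
    rcases Nat.eq_zero_or_pos M with rfl | hM
    · rw [pvB]; simp [pvPos, pvScat]
    · rcases Nat.even_or_odd M with ⟨a, ha⟩ | ⟨a, ha⟩
      · have ha' : M = 2 * a := by omega
        have hapos : 0 < a := by omega
        subst ha'
        rw [pvB, if_neg (by omega), if_neg (by omega)]
        have hdiv : 2 * a / 2 = a := by omega
        rw [hdiv, ih a (by omega), pv_pos_even a, pv_scat_map]
      · have ha' : M = 2 * a + 1 := by omega
        subst ha'
        rw [pvB, if_neg (by omega), if_pos (by omega)]
        have hdiv : (2 * a + 1) / 2 = a := by omega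
        rw [hdiv, ih a (by omega), pv_pos_odd a, pvScat, pv_scat_map,
            pv_scat_shift s _ 0]
        norm_num

theorem pv_mod_two_cases (s : Int) : PySem.Int.mod s 2 = 0 ∨ PySem.Int.mod s 2 = 1 := by
  have h1 := PySem.Int.mod_nonneg s (b := 2) (by omega)
  have h2 := PySem.Int.mod_lt s (b := 2) (by omega)
  omega

theorem pv_band_one_cb (s : Int) :
    PySem.Int.band s 1 = if pvCb s 0 then 1 else 0 := by
  have hone : (1:Int) <<< ((0:Nat) : Int) = 1 := by decide
  rw [PySem.Int.band_one]
  rcases pv_mod_two_cases s with h | h <;>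
    rw [h] <;>
    · have : pvCb s 0 = (PySem.Int.band s 1 != 0) := by rw [pvCb, hone]
      rw [PySem.Int.band_one, h] at this
      simp [this]

theorem pv_recB (s : Int) : ∀ (fuel M : Nat), M ≤ fuel →
    pdepAltRec s fuel (M : Int) = ((pvB s M : Nat) : Int) := by
  intro fuel
  induction fuel generalizing s with
  | zero =>
      intro M hM
      obtain rfl : M = 0 := by omega
      rw [pdepAltRec, pvB]; simp
  | succ f ihf =>
      intro M hM
      rcases Nat.eq_zero_or_pos M with rfl | hMpos
      · rw [pdepAltRec, pvB]; simp
      · have hne : ((M : Int)) ≠ 0 := by exact_mod_cast hMpos.ne'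
        have hband : PySem.Int.band (M : Int) 1 = ((M % 2 : Nat) : Int) := by
          rw [show (1:Int) = ((1 : Nat) : Int) from rfl, PySem.Int.band_natCast,
              Nat.and_one_is_mod]
        have hshift : ((M : Int) >>> (1:Int)) = ((M / 2 : Nat) : Int) := by
          show (Int.ofNat M) >>> (1:Int) = Int.ofNat (M / 2)
          have h2 : M >>> 1 = M / 2 := by
            rw [Nat.shiftRight_eq_div_pow]
          rw [← h2]; rfl
        have hdivle : M / 2 ≤ f := by omega
        rw [pdepAltRec, if_neg hne, hband, hshift, pvB, if_neg (by omega : ¬ M = 0)]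
        rcases Nat.even_or_odd M with ⟨a, ha⟩ | ⟨a, ha⟩
        · -- even
          have hmod : M % 2 = 0 := by omega
          rw [if_neg (show ¬(((M % 2 : Nat) : Int) ≠ 0) by simp [hmod]),
              if_neg (by omega : ¬ M % 2 = 1), ihf s (M / 2) hdivle]
          show Int.ofNat (pvB s (M / 2)) <<< (1:Int) = Int.ofNat (2 * pvB s (M / 2))
          have h3 : pvB s (M / 2) <<< 1 = 2 * pvB s (M / 2) := by
            rw [Nat.shiftLeft_eq]; ring
          rw [← h3]; rfl
        · -- odd
          have hmod : M % 2 = 1 := by omega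
          rw [if_pos (show ((M % 2 : Nat) : Int) ≠ 0 by simp [hmod]),
              if_pos hmod, ihf (s >>> (1:Int)) (M / 2) hdivle, pv_band_one_cb]
          have hsh : ((pvB (s >>> (1:Int)) (M / 2) : Nat) : Int) <<< (1:Int)
              = ((2 * pvB (s >>> (1:Int)) (M / 2) : Nat) : Int) := by
            show Int.ofNat (pvB (s >>> (1:Int)) (M / 2)) <<< (1:Int)
                = Int.ofNat (2 * pvB (s >>> (1:Int)) (M / 2))
            have h3 : pvB (s >>> (1:Int)) (M / 2) <<< 1 = 2 * pvB (s >>> (1:Int)) (M / 2) := by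
              rw [Nat.shiftLeft_eq]; ring
            rw [← h3]; rfl
          rw [hsh]
          cases hcb : pvCb s 0
          · simp only [Bool.false_eq_true, ite_false]
            rw [show ((0:Int)) = ((0:Nat) : Int) from rfl, PySem.Int.bor_natCast]
          · simp only [ite_true]
            rw [show ((1:Int) = ((1:Nat) : Int)) from rfl, PySem.Int.bor_natCast]

theorem pv_B (s m : Int) (h : 0 ≤ m) :
    pdep_alt s m = ((pvScat s 0 (pvPos m.toNat) : Nat) : Int) := by
  have hm : m = ((m.toNat : Nat) : Int) := by omega
  rw [pdep_alt, hm]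
  simp only [Int.toNat_natCast]
  rw [pv_recB s (m.toNat + 1) m.toNat (by omega), pv_pvB_eq_scat]

-- ===== VERDICT (by name: the statement is the Claim_ definition above) =====
theorem pdep_spec : Claim_equal_pdep := by
  intro s m _ hpre
  unfold Spec_pdep
  rw [pv_A s m hpre, pv_B s m hpre]
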